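-- pv_equiv track=rewrite | github.com/rg98/aoc2023 | 3-2.py | next_num
-- ===== SOURCE A (Python) =====
-- def next_num(schema: [str], x: int, y: int) -> (str, int, int):
--     i = y
--     j = x
--     for row in schema[y:]:
--         for c in row[j:]:
--             if c in '0123456789':
--                 n = c
--                 k =  j + 1
--                 while k < len(row) and row[k] in '0123456789':
--                     n += row[k]
--                     k +=  1
--                 return n, j, i
--             else:
--                 j += 1
--         j = 0
--         i += 1
--     return None, -1, -1
-- ===== SOURCE B (Python) =====
-- import re
--
-- _NUM = re.compile(r'[0-9]+')
--
-- def next_num(schema, x, y):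
--     pos = x
--     for i, row in enumerate(schema[y:], start=y):
--         m = _NUM.search(row, pos)
--         if m:
--             return m.group(), m.start(), i
--         pos = 0
--     return None, -1, -1
-- ===== Notes on version B (the rewrite author's own statement) =====
-- stated objective: idiomatic
-- what changed: B replaces the hand-rolled per-character scan with nested counters and a while loop that rebuilds the number character by character with a single compiled regex: one search per row (pattern.search(row, pos)) returns the match text and start column directly, with no per-character branching or accumulators.
-- intended difference: On negative x whose first scanned row contains a digit (and A does not raise), A returns a value shaped by Python's negative-slice index arithmetic (a negative column, or a later-row match after skipping digits before index len+x), while B returns the true first match searched from column 0, the intended reading of 'find the next number from a position'. — e.g. on next_num(["ab1"], -2, 0): A returns (some "1", -1, 0), B returns (some "1", 2, 0)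
import Mathlib
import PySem

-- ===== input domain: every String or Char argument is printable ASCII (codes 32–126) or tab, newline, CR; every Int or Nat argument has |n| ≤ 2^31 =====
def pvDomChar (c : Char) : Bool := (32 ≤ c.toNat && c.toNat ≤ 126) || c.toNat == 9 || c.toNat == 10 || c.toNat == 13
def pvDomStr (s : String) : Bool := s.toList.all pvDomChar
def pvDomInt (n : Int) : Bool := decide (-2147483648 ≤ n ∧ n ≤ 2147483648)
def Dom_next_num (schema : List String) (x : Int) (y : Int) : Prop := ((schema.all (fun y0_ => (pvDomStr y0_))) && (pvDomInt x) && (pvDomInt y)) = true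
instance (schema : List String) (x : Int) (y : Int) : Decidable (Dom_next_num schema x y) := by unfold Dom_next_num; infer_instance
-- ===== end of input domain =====

-- B replaces A's per-character scan (nested index counters + a while loop rebuilding the
-- number) with one regex-style search per row, returning match text and start column directly.


-- ===== PORT A =====
def pvDigits : List Char := ['0', '1', '2', '3', '4', '5', '6', '7', '8', '9']

-- the while loop: `while k < len(row) and row[k] in '0123456789': n += row[k]; k += 1`
-- (structural recursion on fuel = the remaining iteration bound (len(row) - k)⁺, which the
-- guard k < len(row) makes exact: fuel = 0 iff the guard is false)
def nextNumWhileGo (row : List Char) : Nat → List Char → Int → List Char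
  | 0, n, _ => n
  | fuel + 1, n, k =>
    if k < (row.length : Int) then
      match PySem.List.pyGet? row k with
      | some c => if c ∈ pvDigits then nextNumWhileGo row fuel (n ++ [c]) (k + 1) else n
      | none => n   -- row[k] IndexError (k < -len): A raises there; excluded by Pre_
    else n

def nextNumWhile (row : List Char) (n : List Char) (k : Int) : List Char :=
  nextNumWhileGo row ((row.length : Int) - k).toNat n k

-- the inner `for c in row[j:]` loop, carrying the column counter j
def nextNumInner (row : List Char) (cs : List Char) (j : Int) : Option (List Char × Int) :=
  match cs with
  | [] => none
  | c :: rest =>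
    if c ∈ pvDigits then some (nextNumWhile row [c] (j + 1), j)
    else nextNumInner row rest (j + 1)

-- the outer `for row in schema[y:]` loop, carrying i and j (j reset to 0 after each row)
def nextNumRows (rows : List String) (j : Int) (i : Int) : Option String × Int × Int :=
  match rows with
  | [] => (none, -1, -1)
  | row :: rest =>
    match nextNumInner row.toList (PySem.List.slice row.toList (some j) none) j with
    | some (n, jj) => (some (String.ofList n), jj, i)
    | none => nextNumRows rest 0 (i + 1)

def next_num (schema : List String) (x : Int) (y : Int) : Option String × Int × Int :=
  nextNumRows (PySem.List.slice schema (some y) none) x y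

-- ===== PORT B =====
-- re.compile('[0-9]+').search(row, pos): first run of ASCII digits starting at index ≥ pos
-- (re clamps a negative pos to 0); returns (match text, absolute start index)
def reSearchNum (row : List Char) (pos : Int) : Option (List Char × Int) :=
  let start := pos.toNat
  match (row.drop start).findIdx? PySem.Chars.isdigit with
  | none => none
  | some q =>
      let p := start + q
      some ((row.drop p).takeWhile PySem.Chars.isdigit, (p : Int))

-- `for i, row in enumerate(schema[y:], start=y)` with pos = x on the first row, 0 after
def altRows (rows : List String) (pos : Int) (i : Int) : Option String × Int × Int :=
  match rows with
  | [] => (none, -1, -1)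
  | row :: rest =>
    match reSearchNum row.toList pos with
    | some (g, p) => (some (String.ofList g), p, i)
    | none => altRows rest 0 (i + 1)

def next_num_alt (schema : List String) (x : Int) (y : Int) : Option String × Int × Int :=
  altRows (PySem.List.slice schema (some y) none) x y

-- ===== PRECONDITION & SPEC =====
-- Pre_ excludes exactly the inputs on which A raises IndexError: x so far below -len of the
-- first scanned row that the while loop's first read row[k] has k < -len(row).
def Pre_next_num (schema : List String) (x : Int) (y : Int) : Prop :=
  ¬ (∃ r ∈ (PySem.List.slice schema (some y) none).head?, x < -(r.toList.length : Int) ∧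
      ∃ p ∈ r.toList.findIdx? PySem.Chars.isdigit, x + (p : Int) + 1 < -(r.toList.length : Int))
instance (schema : List String) (x : Int) (y : Int) : Decidable (Pre_next_num schema x y) := by unfold Pre_next_num; infer_instance
def pvWitness_next_num : List String × Int × Int := (["ab.", "c12d"], 1, 0)

-- On negative x whose first scanned row contains a digit, A returns a value shaped by Python's
-- negative-slice index arithmetic (a negative column, or a later-row match that skips digits
-- before index len+x); B returns the true first match searched from column 0, the intended
-- reading of "find the next number from a position".
def D_next_num (schema : List String) (x : Int) (y : Int) : Prop :=
  x < 0 ∧ ∃ r ∈ (PySem.List.slice schema (some y) none).head?, ∃ c ∈ r.toList,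
    PySem.Chars.isdigit c = true
instance (schema : List String) (x : Int) (y : Int) : Decidable (D_next_num schema x y) := by unfold D_next_num; infer_instance

def Spec_next_num (schema : List String) (x : Int) (y : Int) (out : Option String × Int × Int) : Prop := ¬ D_next_num schema x y → out = next_num_alt schema x y
instance (schema : List String) (x : Int) (y : Int) (out : Option String × Int × Int) : Decidable (Spec_next_num schema x y out) := by unfold Spec_next_num; infer_instance

def pvDiffWitness_next_num : List String × Int × Int := (["ab1"], -2, 0)
def pvDiffWitnessOut_next_num : (Option String × Int × Int) × (Option String × Int × Int) :=
  ((some "1", -1, 0), (some "1", 2, 0))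

-- ===== CLAIM (what is proved, stated in full; the proofs are below) =====
def Claim_unchanged_next_num : Prop := ∀ (schema : List String) (x : Int) (y : Int), Dom_next_num schema x y → Pre_next_num schema x y → Spec_next_num schema x y (next_num schema x y)
def Claim_changed_next_num : Prop := Dom_next_num (pvDiffWitness_next_num.1) (pvDiffWitness_next_num.2.1) (pvDiffWitness_next_num.2.2) ∧ Pre_next_num (pvDiffWitness_next_num.1) (pvDiffWitness_next_num.2.1) (pvDiffWitness_next_num.2.2) ∧ D_next_num (pvDiffWitness_next_num.1) (pvDiffWitness_next_num.2.1) (pvDiffWitness_next_num.2.2) ∧ next_num (pvDiffWitness_next_num.1) (pvDiffWitness_next_num.2.1) (pvDiffWitness_next_num.2.2) = pvDiffWitnessOut_next_num.1 ∧ next_num_alt (pvDiffWitness_next_num.1) (pvDiffWitness_next_num.2.1) (pvDiffWitness_next_num.2.2) = pvDiffWitnessOut_next_num.2 ∧ pvDiffWitnessOut_next_num.1 ≠ pvDiffWitnessOut_next_num.2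
def Claim_exact_next_num : Prop := ∀ (schema : List String) (x : Int) (y : Int), Dom_next_num schema x y → Pre_next_num schema x y → D_next_num schema x y → next_num schema x y ≠ next_num_alt schema x y

-- ===== LEMMAS AND PROOFS =====

-- membership in A's digit-string equals B's digit test
theorem mem_pvDigits_iff (c : Char) : (c ∈ pvDigits) ↔ PySem.Chars.isdigit c = true := by
  have h : PySem.Chars.isdigit c = true ↔ '0' ≤ c ∧ c ≤ '9' := by simp [PySem.Chars.isdigit]
  have h0 : '0'.val.toNat = 48 := by decide
  have h1 : '1'.val.toNat = 49 := by decide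
  have h2 : '2'.val.toNat = 50 := by decide
  have h3 : '3'.val.toNat = 51 := by decide
  have h4 : '4'.val.toNat = 52 := by decide
  have h5 : '5'.val.toNat = 53 := by decide
  have h6 : '6'.val.toNat = 54 := by decide
  have h7 : '7'.val.toNat = 55 := by decide
  have h8 : '8'.val.toNat = 56 := by decide
  have h9 : '9'.val.toNat = 57 := by decide
  rw [h]
  simp only [pvDigits, List.mem_cons, List.not_mem_nil, or_false, Char.le_def, Char.ext_iff,
    UInt32.le_iff_toNat_le, UInt32.ext_iff, h0, h1, h2, h3, h4, h5, h6, h7, h8, h9]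
  omega

-- A's while loop appends exactly the maximal digit run from position t
theorem nextNumWhileGo_eq (row : List Char) : ∀ (fuel t : Nat) (acc : List Char),
    row.length - t ≤ fuel →
    nextNumWhileGo row fuel acc (t : Int) = acc ++ (row.drop t).takeWhile PySem.Chars.isdigit := by
  intro fuel
  induction fuel with
  | zero =>
    intro t acc h
    rw [nextNumWhileGo, List.drop_of_length_le (by omega)]
    simp
  | succ fuel ih =>
    intro t acc h
    by_cases hlt : t < row.length
    · rw [nextNumWhileGo, if_pos (by exact_mod_cast hlt)]
      rw [PySem.List.pyGet?_ofNat _ _ hlt]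
      rw [List.drop_eq_getElem_cons hlt]
      dsimp only
      by_cases hd : row[t] ∈ pvDigits
      · rw [if_pos hd]
        have hc : (t : Int) + 1 = ((t + 1 : Nat) : Int) := by push_cast; ring
        rw [hc, ih (t+1) _ (by omega)]
        rw [List.takeWhile_cons_of_pos (by rwa [← mem_pvDigits_iff])]
        simp
      · rw [if_neg hd]
        rw [List.takeWhile_cons_of_neg (by simpa [mem_pvDigits_iff] using hd)]
        simp
    · rw [nextNumWhileGo, if_neg (by exact_mod_cast by omega), List.drop_of_length_le (by omega)]
      simp

theorem nextNumWhile_bounded (row : List Char) (d t : Nat) (acc : List Char)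
    (_h : row.length - t ≤ d) :
    nextNumWhile row acc (t : Int) = acc ++ (row.drop t).takeWhile PySem.Chars.isdigit := by
  rw [nextNumWhile]
  exact nextNumWhileGo_eq row _ t acc (by omega)

-- per-row: A's inner scan over row[t:] equals the regex search from position t
theorem inner_eq_search_bounded (row : List Char) : ∀ (d t : Nat), row.length - t ≤ d →
    nextNumInner row (row.drop t) (t : Int) = reSearchNum row (t : Int) := by
  intro d
  induction d with
  | zero =>
    intro t h
    rw [List.drop_of_length_le (by omega)]
    simp [nextNumInner, reSearchNum, List.drop_of_length_le (show row.length ≤ t by omega)]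
  | succ d ih =>
    intro t h
    by_cases hlt : t < row.length
    · rw [List.drop_eq_getElem_cons hlt]
      by_cases hd : row[t] ∈ pvDigits
      · rw [nextNumInner, if_pos hd]
        have hc : (t : Int) + 1 = ((t + 1 : Nat) : Int) := by push_cast; ring
        rw [hc, nextNumWhile_bounded row row.length (t+1) _ (by omega)]
        simp only [reSearchNum, Int.toNat_natCast]
        rw [List.drop_eq_getElem_cons hlt,
          List.findIdx?_cons, if_pos (by rwa [← mem_pvDigits_iff])]
        dsimp only
        simp only [Nat.add_zero]
        rw [List.drop_eq_getElem_cons hlt,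
          List.takeWhile_cons_of_pos (by rwa [← mem_pvDigits_iff])]
        simp
      · rw [nextNumInner, if_neg hd]
        have hc : (t : Int) + 1 = ((t + 1 : Nat) : Int) := by push_cast; ring
        rw [hc, ih (t+1) (by omega)]
        simp only [reSearchNum, Int.toNat_natCast]
        rw [List.drop_eq_getElem_cons hlt, List.findIdx?_cons,
          if_neg (by simpa [mem_pvDigits_iff] using hd)]
        cases hfi : (row.drop (t+1)).findIdx? PySem.Chars.isdigit with
        | none => simp
        | some q =>
          simp only [Option.map_some]
          have hq : t + 1 + q = t + (q + 1) := by omega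
          rw [hq]
    · rw [List.drop_of_length_le (by omega)]
      simp [nextNumInner, reSearchNum, List.drop_of_length_le (show row.length ≤ t by omega)]

-- a scan over digit-free characters finds nothing
theorem inner_none_of_no_digit (row : List Char) (cs : List Char) (j : Int)
    (h : ∀ c ∈ cs, PySem.Chars.isdigit c = false) : nextNumInner row cs j = none := by
  induction cs generalizing j with
  | nil => rfl
  | cons c rest ih =>
    rw [nextNumInner, if_neg (by simp [mem_pvDigits_iff, h c (by simp)])]
    exact ih _ (fun c hc => h c (by simp [hc]))

-- the regex search over a digit-free row finds nothing
theorem search_none_of_no_digit (row : List Char) (pos : Int)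
    (h : ∀ c ∈ row, PySem.Chars.isdigit c = false) : reSearchNum row pos = none := by
  rw [reSearchNum]
  have : (row.drop pos.toNat).findIdx? PySem.Chars.isdigit = none := by
    rw [List.findIdx?_eq_none_iff]
    exact fun c hc => by simp [h c (List.mem_of_mem_drop hc)]
  rw [this]

-- the outer loops agree for a nonnegative starting column
theorem rows_eq (rows : List String) (j : Int) (i : Int) (hj : 0 ≤ j) :
    nextNumRows rows j i = altRows rows j i := by
  induction rows generalizing j i with
  | nil => rfl
  | cons row rest ih =>
    rw [nextNumRows, altRows]
    have hcast : j = ((j.toNat : Nat) : Int) := by omega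
    have hslice : PySem.List.slice row.toList (some j) none = row.toList.drop j.toNat :=
      PySem.List.slice_from row.toList hj
    rw [hslice, hcast]
    simp only [Int.toNat_natCast]
    rw [inner_eq_search_bounded row.toList row.toList.length j.toNat (by omega)]
    cases reSearchNum row.toList ((j.toNat : Nat) : Int) with
    | none => exact ih 0 (i+1) (by omega)
    | some gp => rfl

-- A's inner scan, when it finds a digit, reports a column within the scanned window
theorem inner_some_bounds (row : List Char) (cs : List Char) (j : Int) (n : List Char) (jj : Int)
    (h : nextNumInner row cs j = some (n, jj)) : j ≤ jj ∧ jj < j + cs.length := by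
  induction cs generalizing j with
  | nil => simp [nextNumInner] at h
  | cons c rest ih =>
    rw [nextNumInner] at h
    by_cases hd : c ∈ pvDigits
    · rw [if_pos hd] at h
      obtain ⟨-, h2⟩ := Prod.mk.injEq .. ▸ Option.some.injEq .. ▸ h
      simp only [List.length_cons]
      omega
    · rw [if_neg hd] at h
      have := ih _ h
      simp only [List.length_cons]
      omega

-- A's outer loop either fails altogether or reports some match on a row index ≥ i
theorem rows_shape (rows : List String) (j : Int) (i : Int) :
    nextNumRows rows j i = (none, -1, -1) ∨
      ((nextNumRows rows j i).1.isSome = true ∧ i ≤ (nextNumRows rows j i).2.2) := by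
  induction rows generalizing j i with
  | nil => exact Or.inl rfl
  | cons row rest ih =>
    rw [nextNumRows]
    cases hin : nextNumInner row.toList (PySem.List.slice row.toList (some j) none) j with
    | some p => exact Or.inr (by simp)
    | none =>
      dsimp only
      rcases ih 0 (i + 1) with h | ⟨h1, h2⟩
      · exact Or.inl h
      · exact Or.inr ⟨h1, by omega⟩

-- the regex search from a nonpositive position finds something when the row has a digit
theorem search_some_of_digit (row : List Char) (pos : Int) (hpos : pos ≤ 0)
    (h : ∃ c ∈ row, PySem.Chars.isdigit c = true) :
    ∃ (g : List Char) (qn : Nat), reSearchNum row pos = some (g, (qn : Int)) := by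
  rw [reSearchNum]
  have h0 : pos.toNat = 0 := by omega
  rw [h0]
  simp only [List.drop_zero]
  cases hfi : row.findIdx? PySem.Chars.isdigit with
  | none =>
    rw [List.findIdx?_eq_none_iff] at hfi
    obtain ⟨c, hc, hd⟩ := h
    simp [hfi c hc] at hd
  | some q => exact ⟨_, 0 + q, rfl⟩

-- ===== VERDICT (by name: the statement is the Claim_ definition above) =====
theorem next_num_spec : Claim_unchanged_next_num := by
  intro schema x y _hdom _hpre hnd
  simp only [D_next_num] at hnd
  unfold next_num next_num_alt
  by_cases hx : 0 ≤ x
  · exact rows_eq _ x y hx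
  · cases hs : PySem.List.slice schema (some y) none with
    | nil => rfl
    | cons r rest =>
      push Not at hnd
      have hnd' := hnd (by omega)
      rw [hs] at hnd'
      simp only [List.head?_cons, Option.mem_def, Option.some.injEq, forall_eq'] at hnd'
      rw [nextNumRows, altRows,
        inner_none_of_no_digit _ _ _
          (fun c hc => by simpa using hnd' c (PySem.List.mem_of_mem_slice _ _ _ hc)),
        search_none_of_no_digit _ _ (fun c hc => by simpa using hnd' c hc)]
      exact rows_eq rest 0 (y + 1) le_rfl

set_option maxRecDepth 4000 in
theorem next_num_changed : Claim_changed_next_num := by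
  unfold Claim_changed_next_num
  exact ⟨by decide, by decide, ⟨by decide, "ab1", by decide, '1', by decide, by decide⟩,
    by decide, by decide, by decide⟩

theorem next_num_tight : Claim_exact_next_num := by
  intro schema x y _hdom _hpre hd heq
  obtain ⟨hx, hdig⟩ := hd
  cases hs : PySem.List.slice schema (some y) none with
  | nil => rw [hs] at hdig; simp at hdig
  | cons r rest =>
    rw [hs] at hdig
    simp only [List.head?_cons, Option.mem_def, Option.some.injEq,
      exists_eq_left'] at hdig
    unfold next_num next_num_alt at heq
    rw [hs, nextNumRows, altRows] at heq
    obtain ⟨g, qn, hsearch⟩ := search_some_of_digit r.toList x (by omega) hdig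
    rw [hsearch] at heq
    cases hin : nextNumInner r.toList (PySem.List.slice r.toList (some x) none) x with
    | some p =>
      obtain ⟨n, jj⟩ := p
      rw [hin] at heq
      dsimp only at heq
      -- A's column jj is negative, B's is a natural number
      have hb := inner_some_bounds r.toList _ x n jj hin
      have hlen : (PySem.List.slice r.toList (some x) none).length ≤ (-x).toNat := by
        rw [PySem.List.slice_some_none]
        have hcl : PySem.List.clampIdx r.toList.length x = r.toList.length - (-x).toNat := by
          have h1 := PySem.List.clampIdx_neg_natCast r.toList.length (-x).toNat (by omega)
          rw [show -(((-x).toNat : Nat) : Int) = x by omega] at h1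
          exact h1
        rw [List.length_drop, hcl]
        omega
      have hjj : jj < 0 := by omega
      have : jj = (qn : Int) := congrArg (fun t => t.2.1) heq
      omega
    | none =>
      rw [hin] at heq
      dsimp only at heq
      rcases rows_shape rest 0 (y + 1) with h | ⟨h1, h2⟩
      · rw [h] at heq
        exact absurd (congrArg (fun t => t.1) heq) (by simp)
      · have h3 := congrArg (fun t => t.2.2) heq
        simp only at h3
        omega
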